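-- pv_equiv track=rewrite | github.com/MechanisM/redis-completion | redis_completion/engine.py | score_key
-- ===== SOURCE A (Python) =====
-- def score_key(k, max_size=10):
--     k_len = len(k)
--     iters = min(max_size, k_len)
--     a = ord('a') - 1
--     score = 0
--
--     for i in range(iters):
--         c = (ord(k[i]) - a)
--         score += c*(26**(iters-i))
--     return score
-- ===== SOURCE B (Python) =====
-- def score_key(k, max_size=10):
--     score = 0
--     for ch in k[:max(0, max_size)]:
--         score = score * 26 + ord(ch) - 96
--     return score * 26
-- ===== Notes on version B (the rewrite author's own statement) =====
-- stated objective: idiomatic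
-- what changed: Replaces the indexed loop with per-term big-int exponentiation 26**(iters-i) by a Horner multiply-accumulate fold over the slice k[:max(0, max_size)], with one final *26 supplying A's lowest weight of 26^1.
import Mathlib
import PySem

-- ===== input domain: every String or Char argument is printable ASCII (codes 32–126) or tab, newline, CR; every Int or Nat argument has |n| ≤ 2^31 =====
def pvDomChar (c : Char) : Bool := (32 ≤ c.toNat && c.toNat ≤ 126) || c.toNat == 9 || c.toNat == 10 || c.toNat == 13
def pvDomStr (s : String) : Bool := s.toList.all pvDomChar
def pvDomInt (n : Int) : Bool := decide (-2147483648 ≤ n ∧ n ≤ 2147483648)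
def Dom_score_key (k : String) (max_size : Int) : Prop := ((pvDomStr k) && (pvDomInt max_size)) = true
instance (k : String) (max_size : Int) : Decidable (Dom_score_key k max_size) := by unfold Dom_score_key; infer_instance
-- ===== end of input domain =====

-- B replaces the per-index exponentiation 26**(iters-i) by a Horner multiply-accumulate
-- over the sliced prefix, followed by a final ×26 (objective: idiomatic/simpler).

-- ===== PORT A =====
-- literal transliteration of A: indexed loop over range(iters), each term weighted 26**(iters-i)
def score_key (k : String) (max_size : Int) : Int :=
  let k_len : Int := (k.toList.length : Int)
  let iters : Int := min max_size k_len
  let a : Int := 96   -- ord('a') - 1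
  (PySem.List.pyRange 0 iters 1).foldl
    (fun score i =>
      score + (PySem.List.pyGetD (k.toList.map (fun c => (c.toNat : Int))) i 0 - a)
                * 26 ^ (iters - i).toNat)
    0

-- ===== PORT B =====
-- literal transliteration of B: Horner fold over the slice k[:max(0, max_size)], then *26
def score_key_alt (k : String) (max_size : Int) : Int :=
  ((PySem.List.slice k.toList none (some (max 0 max_size))).foldl
      (fun score c => score * 26 + (c.toNat : Int) - 96) 0) * 26

-- ===== PRECONDITION & SPEC =====
def Spec_score_key (k : String) (max_size : Int) (out : Int) : Prop := out = score_key_alt k max_size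
instance (k : String) (max_size : Int) (out : Int) : Decidable (Spec_score_key k max_size out) := by unfold Spec_score_key; infer_instance

-- ===== CLAIM (what is proved, stated in full; the proofs are below) =====
def Claim_equal_score_key : Prop := ∀ (k : String) (max_size : Int), Dom_score_key k max_size → Spec_score_key k max_size (score_key k max_size)

-- ===== LEMMAS AND PROOFS =====

def hornerInt (cs : List Int) : Int := cs.foldl (fun s c => s * 26 + c) 0

theorem hornerInt_append (cs : List Int) (c : Int) :
    hornerInt (cs ++ [c]) = hornerInt cs * 26 + c := by
  simp [hornerInt]

-- the positional-weight sum of A equals Horner's value times 26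
theorem sum_pow_eq_horner (cs : List Int) :
    ((List.range cs.length).map (fun j => cs.getD j 0 * (26:Int) ^ (cs.length - j))).sum
      = hornerInt cs * 26 := by
  induction cs using List.reverseRecOn with
  | nil => simp [hornerInt]
  | append_singleton cs c ih =>
    have hlen : (cs ++ [c]).length = cs.length + 1 := by simp
    rw [hornerInt_append, hlen, List.range_succ, List.map_append, List.sum_append]
    have h1 : (List.range cs.length).map
        (fun j => (cs ++ [c]).getD j 0 * (26:Int) ^ (cs.length + 1 - j))
        = (List.range cs.length).map
        (fun j => (cs.getD j 0 * (26:Int) ^ (cs.length - j)) * 26) := by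
      refine List.map_congr_left ?_
      intro j hj
      have hjn : j < cs.length := List.mem_range.mp hj
      have hget : (cs ++ [c]).getD j 0 = cs.getD j 0 := by
        simp [List.getD_eq_getElem?_getD, List.getElem?_append_left hjn]
      have hexp : cs.length + 1 - j = (cs.length - j) + 1 := by omega
      rw [hget, hexp, pow_succ]; ring
    have h2 : ((cs ++ [c]).getD cs.length 0) = c := by
      simp [List.getD_eq_getElem?_getD]
    rw [h1, List.sum_map_mul_right, ih]
    simp only [List.map_cons, List.map_nil, List.sum_cons, List.sum_nil, h2]
    have : cs.length + 1 - cs.length = 1 := by omega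
    rw [this]; ring

theorem score_key_eq (k : String) (max_size : Int) :
    score_key k max_size = score_key_alt k max_size := by
  unfold score_key score_key_alt
  dsimp only
  set L := k.toList with hL
  set iters : Int := min max_size (L.length : Int) with hiters
  set n : Nat := iters.toNat with hn
  have hnL : n ≤ L.length := by omega
  -- B side: the slice is L.take n
  have hslice : PySem.List.slice L none (some (max 0 max_size)) = L.take n := by
    have h0 : (0:Int) ≤ max 0 max_size := le_max_left _ _
    have : max 0 max_size = (((max 0 max_size).toNat : Nat) : Int) := by omega
    rw [this, PySem.List.slice_to_natCast]
    rw [List.take_eq_take_iff]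
    omega
  rw [hslice]
  -- A side: turn the pyRange fold into a weighted sum over List.range n
  rw [PySem.List.pyRange_one]
  have hiters0 : (iters - 0).toNat = n := by omega
  rw [hiters0, List.foldl_map, PySem.List.foldl_add]
  set cs : List Int := (L.take n).map (fun c => (c.toNat : Int) - 96) with hcs
  have hcslen : cs.length = n := by
    simp [hcs, List.length_take]; omega
  have hmap : (List.range n).map
      (fun (j : Nat) => (PySem.List.pyGetD (L.map (fun c => (c.toNat : Int))) (0 + (j:Int)) 0 - 96)
                  * 26 ^ (iters - (0 + (j:Int))).toNat)
      = (List.range cs.length).map (fun j => cs.getD j 0 * (26:Int) ^ (cs.length - j)) := by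
    rw [hcslen]
    refine List.map_congr_left ?_
    intro j hj
    have hjn : j < n := List.mem_range.mp hj
    have hjL : j < L.length := lt_of_lt_of_le hjn hnL
    have hz : (0:Int) + (j:Int) = ((j:Int)) := by ring
    rw [hz, PySem.List.pyGetD_natCast]
    have hexp : (iters - (j:Int)).toNat = n - j := by omega
    have hg1 : (L.map (fun c => (c.toNat : Int))).getD j 0 = (L[j].toNat : Int) := by
      rw [List.getD_eq_getElem _ _ (by simpa using hjL)]
      simp
    have hg2 : cs.getD j 0 = (L[j].toNat : Int) - 96 := by
      rw [hcs, List.getD_eq_getElem _ _ (by simp [List.length_take]; omega)]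
      simp [List.getElem_take]
    rw [hexp, hg1, hg2]
  rw [hmap, sum_pow_eq_horner]
  -- B side: the Horner fold over chars is hornerInt over cs
  have hB : (L.take n).foldl (fun score c => score * 26 + (c.toNat : Int) - 96) 0
      = hornerInt cs := by
    have hf : (fun (score : Int) (c : Char) => score * 26 + (c.toNat : Int) - 96)
        = (fun (score : Int) (c : Char) => score * 26 + ((c.toNat : Int) - 96)) := by
      funext s c; ring
    rw [hf, hcs, hornerInt, List.foldl_map]
  rw [hB]; ring

-- ===== VERDICT (by name: the statement is the Claim_ definition above) =====
theorem score_key_spec : Claim_equal_score_key := by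
  intro k max_size _
  unfold Spec_score_key
  exact score_key_eq k max_size
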